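-- pv_equiv track=rewrite | github.com/LanNetwork/data-structures-and-algorithms-personal | pe_08/treasure_hunter.py | hunt_treasure
-- ===== SOURCE A (Python) =====
-- def hunt_treasure(arr, n, k):
--     """Makes each hunter hunt for treasure. Returns the maximum amount of treasure than can be found
--     with the particular set of hunters.
--     """
--
--     # Define a set to store visited indexes of arr.
--     captured = set()
--     count = 0
--
--     # Iterate arr until you hit hunter. Then, check k units in front of the hunter for non-captured treasure.
--     for i in range(len(arr)):
--         if arr[i] == 'H':
--             for j in range(i-k, i+k): # Check items in range of current hunter, starting as far left as possible.
--                 # Make sure j is in bounds.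
--                 if j < 0: # too small, next iteration
--                      continue
--                 elif j > len(arr) - 1: # too large, quit loop.
--                      break
--                 else: # in range.
--                     if (arr[j] == 'T') and (not (j in captured)): # check if it's a valid treasure
--                             captured.add(j)
--                             count += 1
--                             break
--     return count
-- ===== SOURCE B (Python) =====
-- def hunt_treasure(arr, n, k):
--     treasures = [i for i, x in enumerate(arr) if x == 'T']
--     hunters = [i for i, x in enumerate(arr) if x == 'H']
--     p = 0
--     count = 0
--     for i in hunters:
--         while p < len(treasures) and treasures[p] < i - k:
--             p += 1
--         if p < len(treasures) and treasures[p] < i + k: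
--             p += 1
--             count += 1
--     return count
-- ===== Notes on version B (the rewrite author's own statement) =====
-- stated objective: alternative
-- what changed: Replaced A's per-hunter rescan of the 2k-wide window plus a captured-index set by a single left-to-right two-pointer sweep over precomputed hunter and treasure position lists, visiting each treasure position at most once.
import Mathlib
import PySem

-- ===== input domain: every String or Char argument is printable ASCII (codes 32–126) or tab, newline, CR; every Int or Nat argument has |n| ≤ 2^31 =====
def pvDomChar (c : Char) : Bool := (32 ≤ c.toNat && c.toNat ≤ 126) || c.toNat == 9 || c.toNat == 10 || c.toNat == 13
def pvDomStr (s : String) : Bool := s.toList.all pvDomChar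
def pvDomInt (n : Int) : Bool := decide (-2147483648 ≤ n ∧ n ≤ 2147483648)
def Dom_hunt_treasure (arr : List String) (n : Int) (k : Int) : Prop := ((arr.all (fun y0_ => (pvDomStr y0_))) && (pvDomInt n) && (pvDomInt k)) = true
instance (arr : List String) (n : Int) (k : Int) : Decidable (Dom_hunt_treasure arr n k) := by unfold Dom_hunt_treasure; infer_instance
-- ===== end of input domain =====

-- B replaces A's per-hunter window rescans (with a captured-index set) by a
-- left-to-right two-pointer sweep over the precomputed hunter and treasure
-- positions (objective: alternative).

-- ===== PORT A =====
-- inner 'for j in range(i-k, i+k)' loop with its continue/break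
def huntInner (arr : List String) (js : List Int) (cap : PySem.Set Int) (count : Int) :
    PySem.Set Int × Int :=
  match js with
  | [] => (cap, count)
  | j :: rest =>
    if j < 0 then huntInner arr rest cap count
    else if j > (arr.length : Int) - 1 then (cap, count)
    else if (PySem.List.pyGet? arr j == some "T") && !(PySem.Set.contains cap j) then
      (PySem.Set.add cap j, count + 1)
    else huntInner arr rest cap count

def huntStepA (arr : List String) (k : Int) (st : PySem.Set Int × Int) (i : Int) :
    PySem.Set Int × Int :=
  if PySem.List.pyGet? arr i == some "H" then
    huntInner arr (PySem.List.pyRange (i - k) (i + k) 1) st.1 st.2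
  else st

def hunt_treasure (arr : List String) (n : Int) (k : Int) : Int :=
  ((PySem.List.pyRange 0 (arr.length : Int) 1).foldl (huntStepA arr k)
    (PySem.Set.empty, 0)).2

-- ===== PORT B =====
-- treasures = [i for i, x in enumerate(arr) if x == 'T']
def tIdx (arr : List String) : List Int :=
  (PySem.List.enumerate arr).filterMap (fun p => if p.2 == "T" then some p.1 else none)

-- hunters = [i for i, x in enumerate(arr) if x == 'H']
def hIdx (arr : List String) : List Int :=
  (PySem.List.enumerate arr).filterMap (fun p => if p.2 == "H" then some p.1 else none)

-- while p < len(treasures) and treasures[p] < bound: p += 1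
def advance (ts : List Int) (bound : Int) (p : Nat) : Nat :=
  if h : p < ts.length then
    if ts[p] < bound then advance ts bound (p + 1) else p
  else p
termination_by ts.length - p

def huntStepB (ts : List Int) (k : Int) (st : Nat × Int) (i : Int) :
    Nat × Int :=
  let p := advance ts (i - k) st.1
  if h : p < ts.length then
    if ts[p] < i + k then (p + 1, st.2 + 1) else (p, st.2)
  else (p, st.2)

def hunt_treasure_alt (arr : List String) (n : Int) (k : Int) : Int :=
  ((hIdx arr).foldl (huntStepB (tIdx arr) k) (0, 0)).2

-- ===== PRECONDITION & SPEC =====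
def Spec_hunt_treasure (arr : List String) (n : Int) (k : Int) (out : Int) : Prop := out = hunt_treasure_alt arr n k
instance (arr : List String) (n : Int) (k : Int) (out : Int) : Decidable (Spec_hunt_treasure arr n k out) := by unfold Spec_hunt_treasure; infer_instance

-- ===== CLAIM (what is proved, stated in full; the proofs are below) =====
def Claim_equal_hunt_treasure : Prop := ∀ (arr : List String) (n : Int) (k : Int), Dom_hunt_treasure arr n k → Spec_hunt_treasure arr n k (hunt_treasure arr n k)

-- ===== LEMMAS AND PROOFS =====

-- characterization of tIdx's generalized form over an enumerate suffix
theorem mem_enumFilter (l : List String) (s j : Int) :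
    j ∈ (PySem.List.enumerate l s).filterMap
        (fun p => if p.2 == "T" then some p.1 else none) ↔
      ∃ q : Nat, ∃ _ : q < l.length, l[q] = "T" ∧ j = s + q := by
  induction l generalizing s with
  | nil => simp [PySem.List.enumerate_nil]
  | cons x l ih =>
    rw [PySem.List.enumerate_cons]
    simp only [List.filterMap_cons]
    by_cases hx : x = "T"
    · simp only [hx, beq_self_eq_true, if_pos, List.mem_cons, ih]
      constructor
      · rintro (rfl | ⟨q, hq, hT, rfl⟩)
        · exact ⟨0, by simp, by simpa using hx, by simp⟩
        · exact ⟨q + 1, by simp only [List.length_cons]; omega, by simpa using hT, by push_cast; ring⟩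
      · rintro ⟨q, hq, hT, rfl⟩
        cases q with
        | zero => left; simp
        | succ q =>
          right
          exact ⟨q, by simp only [List.length_cons] at hq; omega, by simpa using hT, by push_cast; ring⟩
    · have : (x == "T") = false := by simp [hx]
      simp only [this, if_neg, Bool.false_eq_true, not_false_iff, ih]
      constructor
      · rintro ⟨q, hq, hT, rfl⟩
        exact ⟨q + 1, by simp only [List.length_cons]; omega, by simpa using hT, by push_cast; ring⟩
      · rintro ⟨q, hq, hT, rfl⟩
        cases q with
        | zero => exact absurd (by simpa using hT) hx
        | succ q =>
          exact ⟨q, by simp only [List.length_cons] at hq; omega, by simpa using hT, by push_cast; ring⟩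

theorem mem_tIdx (arr : List String) (j : Int) :
    j ∈ tIdx arr ↔ ∃ q : Nat, ∃ _ : q < arr.length, arr[q] = "T" ∧ j = q := by
  have := mem_enumFilter arr 0 j
  simp only [tIdx, PySem.List.enumerate]
  rw [this]
  simp

theorem pairwise_enumFilter (l : List String) (s : Int) :
    ((PySem.List.enumerate l s).filterMap
        (fun p => if p.2 == "T" then some p.1 else none)).Pairwise (· < ·) := by
  induction l generalizing s with
  | nil => simp [PySem.List.enumerate_nil]
  | cons x l ih =>
    rw [PySem.List.enumerate_cons]
    simp only [List.filterMap_cons]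
    by_cases hx : x = "T"
    · simp only [hx, beq_self_eq_true, if_pos]
      refine List.Pairwise.cons ?_ (ih (s + 1))
      intro y hy
      rcases (mem_enumFilter l (s + 1) y).mp hy with ⟨q, hq, hT, rfl⟩
      omega
    · have : (x == "T") = false := by simp [hx]
      simp only [this]
      exact ih (s + 1)

theorem tIdx_sorted (arr : List String) : (tIdx arr).Pairwise (· < ·) :=
  pairwise_enumFilter arr 0

theorem tIdx_strictMono (arr : List String) {q r : Nat}
    (hq : q < (tIdx arr).length) (hr : r < (tIdx arr).length) (h : q < r) :
    (tIdx arr)[q] < (tIdx arr)[r] :=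
  (List.pairwise_iff_getElem.mp (tIdx_sorted arr)) q r hq hr h

theorem tIdx_elem (arr : List String) {q : Nat} (hq : q < (tIdx arr).length) :
    ∃ m : Nat, ∃ _ : m < arr.length, arr[m] = "T" ∧ (tIdx arr)[q] = m :=
  (mem_tIdx arr _).mp (List.getElem_mem hq)

-- advance: skipped entries are below the bound; the stop entry is not
theorem advance_spec (ts : List Int) (bound : Int) (p : Nat) (hp : p ≤ ts.length) :
    p ≤ advance ts bound p ∧ advance ts bound p ≤ ts.length ∧
    (∀ q : Nat, (hq : q < ts.length) → p ≤ q → q < advance ts bound p → ts[q] < bound) ∧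
    ((h : advance ts bound p < ts.length) → ¬ ts[advance ts bound p] < bound) := by
  induction hn : ts.length - p generalizing p with
  | zero =>
    have : ¬ p < ts.length := by omega
    rw [advance, dif_neg this]
    exact ⟨le_refl _, hp, by omega, fun h => absurd h this⟩
  | succ n ih =>
    have hlt : p < ts.length := by omega
    rw [advance, dif_pos hlt]
    by_cases hb : ts[p] < bound
    · rw [if_pos hb]
      obtain ⟨h1, h2, h3, h4⟩ := ih (p + 1) (by omega) (by omega)
      refine ⟨by omega, h2, ?_, h4⟩
      intro q hq hpq hqa
      rcases Nat.eq_or_lt_of_le hpq with rfl | h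
      · exact hb
      · exact h3 q hq h hqa
    · rw [if_neg hb]
      exact ⟨le_refl _, le_of_lt hlt, by omega, fun _ => hb⟩

-- A's inner loop finds nothing if every in-window treasure is already captured
theorem huntInner_none (arr : List String) (cap : List Int) (c : Int) (a b : Int)
    (h : ∀ j : Int, a ≤ j → j < b → 0 ≤ j → j < (arr.length : Int) →
      PySem.List.pyGet? arr j = some "T" → j ∈ cap) :
    huntInner arr (PySem.List.pyRange a b 1) cap c = (cap, c) := by
  induction hn : (b - a).toNat generalizing a with
  | zero =>
    rw [PySem.List.pyRange_one_eq_nil (by omega)]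
    rfl
  | succ n ih =>
    rw [PySem.List.pyRange_one_cons (by omega)]
    show huntInner arr (a :: _) cap c = _
    rw [huntInner]
    by_cases ha : a < 0
    · rw [if_pos ha]
      exact ih (a + 1) (fun j h1 h2 => h j (by omega) h2) (by omega)
    · rw [if_neg ha]
      by_cases hbig : a > (arr.length : Int) - 1
      · rw [if_pos hbig]
      · rw [if_neg hbig]
        have hcond : ((PySem.List.pyGet? arr a == some "T") &&
            !(PySem.Set.contains cap a)) = false := by
          by_cases hT : PySem.List.pyGet? arr a = some "T"
          · have hmem : a ∈ cap := h a (le_refl _) (by omega) (by omega) (by omega) hT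
            simp [PySem.Set.contains, hT]
            exact hmem
          · simp [hT]
        rw [if_neg (by rw [hcond]; exact Bool.false_ne_true)]
        exact ih (a + 1) (fun j h1 h2 => h j (by omega) h2) (by omega)

-- A's inner loop captures the leftmost live treasure j0 of the window
theorem huntInner_find (arr : List String) (cap : List Int) (c : Int) (a b j0 : Int)
    (haj : a ≤ j0) (hjb : j0 < b) (h0 : 0 ≤ j0) (hlen : j0 < (arr.length : Int))
    (hT : PySem.List.pyGet? arr j0 = some "T") (hnc : j0 ∉ cap)
    (hprev : ∀ j : Int, a ≤ j → j < j0 → 0 ≤ j →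
      PySem.List.pyGet? arr j = some "T" → j ∈ cap) :
    huntInner arr (PySem.List.pyRange a b 1) cap c = (PySem.Set.add cap j0, c + 1) := by
  induction hn : (j0 - a).toNat generalizing a with
  | zero =>
    have : a = j0 := by omega
    subst this
    rw [PySem.List.pyRange_one_cons (by omega)]
    show huntInner arr (a :: _) cap c = _
    rw [huntInner]
    rw [if_neg (by omega), if_neg (by omega)]
    have hcond : ((PySem.List.pyGet? arr a == some "T") &&
        !(PySem.Set.contains cap a)) = true := by
      simp [hT, PySem.Set.contains, hnc]
    rw [if_pos (by simp_all)]
  | succ n ih =>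
    have halt : a < j0 := by omega
    rw [PySem.List.pyRange_one_cons (by omega)]
    show huntInner arr (a :: _) cap c = _
    rw [huntInner]
    by_cases ha : a < 0
    · rw [if_pos ha]
      exact ih (a + 1) (by omega) (fun j h1 h2 => hprev j (by omega) h2) (by omega)
    · rw [if_neg ha]
      rw [if_neg (by omega)]
      have hcond : ((PySem.List.pyGet? arr a == some "T") &&
          !(PySem.Set.contains cap a)) = false := by
        by_cases hTa : PySem.List.pyGet? arr a = some "T"
        · have hmem : a ∈ cap := hprev a (le_refl _) halt (by omega) hTa
          simp [PySem.Set.contains, hTa]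
          exact hmem
        · simp [hTa]
      rw [if_neg (by rw [hcond]; exact Bool.false_ne_true)]
      exact ih (a + 1) (by omega) (fun j h1 h2 => hprev j (by omega) h2) (by omega)

-- loop invariant relating A's captured set to B's treasure pointer after the
-- first s positions have been processed
def HInv (arr : List String) (k : Int) (s : Int) (cap : List Int) (p : Nat) : Prop :=
  p ≤ (tIdx arr).length ∧
  (∀ q : Nat, (hq : q < (tIdx arr).length) → q < p →
    (tIdx arr)[q] ∈ cap ∨ (tIdx arr)[q] < s - k) ∧
  (∀ q : Nat, (hq : q < (tIdx arr).length) → p ≤ q → (tIdx arr)[q] ∉ cap)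

-- the main induction: the two folds agree from any pair of HInv-related states
theorem main_fold (arr : List String) (k : Int) :
    ∀ (l pre : List String) (cap : List Int) (p : Nat) (c : Int),
      pre ++ l = arr →
      HInv arr k (pre.length : Int) cap p →
      ((PySem.List.pyRange (pre.length : Int) (arr.length : Int) 1).foldl
          (huntStepA arr k) (cap, c)).2
        = (((PySem.List.enumerate l (pre.length : Int)).filterMap
              (fun q => if q.2 == "H" then some q.1 else none)).foldl
            (huntStepB (tIdx arr) k) (p, c)).2 := by
  intro l
  induction l with
  | nil =>
    intro pre cap p c harr hinv
    have hL : arr.length = pre.length := by rw [← harr]; simp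
    rw [hL, PySem.List.pyRange_one_eq_nil (by omega), PySem.List.enumerate_nil]
    rfl
  | cons x l ih =>
    intro pre cap p c harr hinv
    obtain ⟨hp, hinv2, hinv3⟩ := hinv
    -- a treasure cell of arr is an entry of tIdx arr
    have hindex : ∀ j : Int, 0 ≤ j → PySem.List.pyGet? arr j = some "T" →
        ∃ q : Nat, ∃ _ : q < (tIdx arr).length, (tIdx arr)[q] = j := by
      intro j h0 hT
      rw [PySem.List.pyGet?_of_nonneg arr h0] at hT
      obtain ⟨hjl, hjT⟩ := List.getElem?_eq_some_iff.mp hT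
      have : j ∈ tIdx arr := (mem_tIdx arr j).mpr ⟨j.toNat, hjl, hjT, by omega⟩
      obtain ⟨q, hq, hEq⟩ := List.mem_iff_getElem.mp this
      exact ⟨q, hq, hEq⟩
    have hlen : pre.length < arr.length := by rw [← harr]; simp
    have harr' : (pre ++ [x]) ++ l = arr := by simpa using harr
    have hL1 : ((pre ++ [x]).length : Int) = (pre.length : Int) + 1 := by simp
    have hgx : PySem.List.pyGet? arr (pre.length : Int) = some x := by
      rw [← harr]; exact PySem.List.pyGet?_append_length pre l x
    rw [PySem.List.pyRange_one_cons (by exact_mod_cast hlen), List.foldl_cons,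
      PySem.List.enumerate_cons, List.filterMap_cons]
    by_cases hx : x = "H"
    · -- a hunter at position pre.length
      obtain ⟨ha1, ha2, ha3, ha4⟩ :=
        advance_spec (tIdx arr) ((pre.length : Int) - k) p hp
      have hstepA : huntStepA arr k (cap, c) (pre.length : Int) =
          huntInner arr
            (PySem.List.pyRange ((pre.length : Int) - k) ((pre.length : Int) + k) 1) cap c := by
        rw [huntStepA, if_pos (by simp [hgx, hx])]
      by_cases hcap : ∃ h : advance (tIdx arr) ((pre.length : Int) - k) p < (tIdx arr).length,
          (tIdx arr)[advance (tIdx arr) ((pre.length : Int) - k) p] < (pre.length : Int) + k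
      · -- capture case: A grabs the treasure at the stop pointer, B consumes it
        obtain ⟨hc1, hc2⟩ := hcap
        obtain ⟨m, hm, hmT, hEq⟩ := tIdx_elem arr hc1
        have h0 : (0 : Int) ≤ (tIdx arr)[advance (tIdx arr) ((pre.length : Int) - k) p] := by
          rw [hEq]; positivity
        have hjlen : (tIdx arr)[advance (tIdx arr) ((pre.length : Int) - k) p] < (arr.length : Int) := by
          rw [hEq]; exact_mod_cast hm
        have hjT : PySem.List.pyGet? arr (tIdx arr)[advance (tIdx arr) ((pre.length : Int) - k) p] = some "T" := by
          rw [hEq, PySem.List.pyGet?_natCast, List.getElem?_eq_getElem hm, hmT]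
        have haj : (pre.length : Int) - k ≤ (tIdx arr)[advance (tIdx arr) ((pre.length : Int) - k) p] := by
          have := ha4 hc1; omega
        have hprev : ∀ j : Int, (pre.length : Int) - k ≤ j →
            j < (tIdx arr)[advance (tIdx arr) ((pre.length : Int) - k) p] → 0 ≤ j →
            PySem.List.pyGet? arr j = some "T" → j ∈ cap := by
          intro j hj1 hj2 hj0 hjTT
          obtain ⟨q, hq, hqEq⟩ := hindex j hj0 hjTT
          have hqp' : q < advance (tIdx arr) ((pre.length : Int) - k) p := by
            by_contra hge
            rcases Nat.eq_or_lt_of_le (Nat.le_of_not_lt hge) with heq | hlt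
            · have h2 : (tIdx arr)[advance (tIdx arr) ((pre.length : Int) - k) p] = j := by
                simp only [heq]; exact hqEq
              omega
            · have := tIdx_strictMono arr hc1 hq hlt; omega
          rcases Nat.lt_or_ge q p with hqp | hqp
          · rcases hinv2 q hq hqp with hmem | hsmall
            · rwa [hqEq] at hmem
            · omega
          · have := ha3 q hq hqp hqp'; omega
        have hA : huntInner arr
            (PySem.List.pyRange ((pre.length : Int) - k) ((pre.length : Int) + k) 1) cap c =
            (PySem.Set.add cap (tIdx arr)[advance (tIdx arr) ((pre.length : Int) - k) p], c + 1) :=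
          huntInner_find arr cap c _ _ _ haj hc2 h0 hjlen hjT (hinv3 _ hc1 ha1) hprev
        have hstepB : huntStepB (tIdx arr) k (p, c) (pre.length : Int) =
            (advance (tIdx arr) ((pre.length : Int) - k) p + 1, c + 1) := by
          rw [huntStepB]
          rw [dif_pos hc1, if_pos hc2]
        rw [hstepA, hA, if_pos (by simp [hx]), List.foldl_cons, hstepB]
        have hinv' : HInv arr k ((pre ++ [x]).length : Int)
            (PySem.Set.add cap (tIdx arr)[advance (tIdx arr) ((pre.length : Int) - k) p])
            (advance (tIdx arr) ((pre.length : Int) - k) p + 1) := by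
          refine ⟨by omega, ?_, ?_⟩
          · intro q hq hqp
            rcases Nat.lt_or_ge q p with hqp2 | hqp2
            · rcases hinv2 q hq hqp2 with hmem | hsmall
              · exact Or.inl ((PySem.Set.mem_add _ _ _).mpr (Or.inl hmem))
              · right; rw [hL1]; omega
            · rcases Nat.lt_or_ge q (advance (tIdx arr) ((pre.length : Int) - k) p) with hqp3 | hqp3
              · have := ha3 q hq hqp2 hqp3; right; rw [hL1]; omega
              · have : q = advance (tIdx arr) ((pre.length : Int) - k) p := by omega
                subst this
                exact Or.inl ((PySem.Set.mem_add _ _ _).mpr (Or.inr rfl))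
          · intro q hq hqp hmem
            rcases (PySem.Set.mem_add _ _ _).mp hmem with hmem2 | hmem2
            · exact hinv3 q hq (by omega) hmem2
            · have := tIdx_strictMono arr hc1 hq (by omega); omega
        have := ih (pre ++ [x])
          (PySem.Set.add cap (tIdx arr)[advance (tIdx arr) ((pre.length : Int) - k) p])
          (advance (tIdx arr) ((pre.length : Int) - k) p + 1) (c + 1) harr' hinv'
        rw [hL1] at this
        exact this
      · -- no capture: every in-window treasure is already captured; states carry over
        have hnone : ∀ j : Int, (pre.length : Int) - k ≤ j → j < (pre.length : Int) + k →
            0 ≤ j → j < (arr.length : Int) → PySem.List.pyGet? arr j = some "T" → j ∈ cap := by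
          intro j hj1 hj2 hj0 hjl hjTT
          obtain ⟨q, hq, hqEq⟩ := hindex j hj0 hjTT
          rcases Nat.lt_or_ge q p with hqp | hqp
          · rcases hinv2 q hq hqp with hmem | hsmall
            · rwa [hqEq] at hmem
            · omega
          · rcases Nat.lt_or_ge q (advance (tIdx arr) ((pre.length : Int) - k) p) with hqp3 | hqp3
            · have := ha3 q hq hqp hqp3; omega
            · exfalso
              have hc1 : advance (tIdx arr) ((pre.length : Int) - k) p < (tIdx arr).length := by omega
              have hbig : ¬ (tIdx arr)[advance (tIdx arr) ((pre.length : Int) - k) p] < (pre.length : Int) + k := by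
                intro hlt; exact hcap ⟨hc1, hlt⟩
              rcases Nat.eq_or_lt_of_le hqp3 with heq | hlt
              · simp only [heq] at hbig; omega
              · have := tIdx_strictMono arr hc1 hq hlt; omega
        have hA : huntInner arr
            (PySem.List.pyRange ((pre.length : Int) - k) ((pre.length : Int) + k) 1) cap c =
            (cap, c) := huntInner_none arr cap c _ _ hnone
        have hstepB : huntStepB (tIdx arr) k (p, c) (pre.length : Int) =
            (advance (tIdx arr) ((pre.length : Int) - k) p, c) := by
          rw [huntStepB]
          by_cases hc1 : advance (tIdx arr) ((pre.length : Int) - k) p < (tIdx arr).length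
          · rw [dif_pos hc1, if_neg (fun hlt => hcap ⟨hc1, hlt⟩)]
          · rw [dif_neg hc1]
        rw [hstepA, hA, if_pos (by simp [hx]), List.foldl_cons, hstepB]
        have hinv' : HInv arr k ((pre ++ [x]).length : Int) cap
            (advance (tIdx arr) ((pre.length : Int) - k) p) := by
          refine ⟨ha2, ?_, ?_⟩
          · intro q hq hqp
            rcases Nat.lt_or_ge q p with hqp2 | hqp2
            · rcases hinv2 q hq hqp2 with hmem | hsmall
              · exact Or.inl hmem
              · right; rw [hL1]; omega
            · have := ha3 q hq hqp2 hqp; right; rw [hL1]; omega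
          · intro q hq hqp
            exact hinv3 q hq (by omega)
        have := ih (pre ++ [x]) cap (advance (tIdx arr) ((pre.length : Int) - k) p) c harr' hinv'
        rw [hL1] at this
        exact this
    · -- not a hunter: both sides skip the position
      have hstepA : huntStepA arr k (cap, c) (pre.length : Int) = (cap, c) := by
        rw [huntStepA, if_neg (by simp [hgx, hx])]
      rw [hstepA, if_neg (by simp [hx])]
      have hinv' : HInv arr k ((pre ++ [x]).length : Int) cap p := by
        refine ⟨hp, ?_, hinv3⟩
        intro q hq hqp
        rcases hinv2 q hq hqp with hmem | hsmall
        · exact Or.inl hmem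
        · right; rw [hL1]; omega
      have := ih (pre ++ [x]) cap p c harr' hinv'
      rw [hL1] at this
      exact this

-- ===== VERDICT (by name: the statement is the Claim_ definition above) =====
theorem hunt_treasure_spec : Claim_equal_hunt_treasure := by
  intro arr n k _
  unfold Spec_hunt_treasure hunt_treasure hunt_treasure_alt hIdx
  have h := main_fold arr k arr [] [] 0 0 rfl ?_
  · simpa using h
  · refine ⟨Nat.zero_le _, by omega, ?_⟩
    intro q hq _
    simp
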